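-- pv_equiv track=rewrite | github.com/cy4lume/u2b2 | not_working_emul.py | get_unexecuted_ranges
-- ===== SOURCE A (Python) =====
-- def get_unexecuted_ranges(start, end, executed_addrs):
--     unexec = [addr for addr in range(start, end) if addr not in executed_addrs]
--     ranges = []
--     for addr in unexec:
--         if not ranges or addr != ranges[-1][1] + 1:
--             ranges.append([addr, addr])
--         else:
--             ranges[-1][1] = addr
--     return ranges
-- ===== SOURCE B (Python) =====
-- def get_unexecuted_ranges(start, end, executed_addrs):
--     xs = sorted(set(a for a in executed_addrs if start <= a < end))
--     out = []
--     cur = start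
--     for x in xs:
--         if cur <= x - 1:
--             out.append([cur, x - 1])
--         cur = x + 1
--     if cur <= end - 1:
--         out.append([cur, end - 1])
--     return out
-- ===== Notes on version B (the rewrite author's own statement) =====
-- stated objective: alternative
-- what changed: Instead of scanning every address in range(start,end) with a linear membership test in executed_addrs and then grouping consecutive survivors into runs, B sorts the deduplicated executed addresses that fall inside the range and emits the complementary gap intervals directly.
import Mathlib
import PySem

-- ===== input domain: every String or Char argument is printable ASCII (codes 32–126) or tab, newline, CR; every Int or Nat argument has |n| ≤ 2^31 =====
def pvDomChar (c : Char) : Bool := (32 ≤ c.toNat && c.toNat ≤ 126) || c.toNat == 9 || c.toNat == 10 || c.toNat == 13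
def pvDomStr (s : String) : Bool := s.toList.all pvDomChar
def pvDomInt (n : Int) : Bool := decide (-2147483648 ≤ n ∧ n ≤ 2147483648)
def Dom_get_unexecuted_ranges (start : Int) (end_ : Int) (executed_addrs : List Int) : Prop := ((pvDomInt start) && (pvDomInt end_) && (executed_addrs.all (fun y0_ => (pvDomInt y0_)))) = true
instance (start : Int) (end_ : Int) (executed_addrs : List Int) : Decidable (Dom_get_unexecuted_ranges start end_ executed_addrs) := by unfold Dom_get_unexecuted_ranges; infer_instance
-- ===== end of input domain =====

-- B replaces A's scan of the whole range (with a linear membership test per address)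
-- by sorting the deduplicated executed addresses inside the range and emitting the
-- complementary gap intervals; the proof shows the return values are equal on all inputs.

-- ===== PORT A =====
-- one loop step of A: `if not ranges or addr != ranges[-1][1] + 1: append [addr,addr] else: ranges[-1][1] = addr`
-- (ranges[-1] is getLast?; its entries are always 2-element lists, read with List.getD)
def pyStepA (ranges : List (List Int)) (addr : Int) : List (List Int) :=
  match ranges.getLast? with
  | none => ranges ++ [[addr, addr]]
  | some r =>
      if addr ≠ r.getD 1 0 + 1 then ranges ++ [[addr, addr]]
      else ranges.dropLast ++ [[r.getD 0 0, addr]]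

def get_unexecuted_ranges (start : Int) (end_ : Int) (executed_addrs : List Int) : List (List Int) :=
  let unexec := (PySem.List.pyRange start end_ 1).filter (fun addr => !(executed_addrs.contains addr))
  unexec.foldl pyStepA []

-- ===== PORT B =====
def get_unexecuted_ranges_alt (start : Int) (end_ : Int) (executed_addrs : List Int) : List (List Int) :=
  let xs := PySem.List.sorted (PySem.Set.ofList (executed_addrs.filter (fun a => decide (start ≤ a ∧ a < end_)))) (fun x => x) false
  let res := xs.foldl (fun (st : List (List Int) × Int) x =>
      (if st.2 ≤ x - 1 then st.1 ++ [[st.2, x - 1]] else st.1, x + 1)) ([], start)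
  if res.2 ≤ end_ - 1 then res.1 ++ [[res.2, end_ - 1]] else res.1

-- ===== PRECONDITION & SPEC =====
def Spec_get_unexecuted_ranges (start : Int) (end_ : Int) (executed_addrs : List Int) (out : List (List Int)) : Prop := out = get_unexecuted_ranges_alt start end_ executed_addrs
instance (start : Int) (end_ : Int) (executed_addrs : List Int) (out : List (List Int)) : Decidable (Spec_get_unexecuted_ranges start end_ executed_addrs out) := by unfold Spec_get_unexecuted_ranges; infer_instance

-- ===== CLAIM (what is proved, stated in full; the proofs are below) =====
def Claim_equal_get_unexecuted_ranges : Prop := ∀ (start : Int) (end_ : Int) (executed_addrs : List Int), Dom_get_unexecuted_ranges start end_ executed_addrs → Spec_get_unexecuted_ranges start end_ executed_addrs (get_unexecuted_ranges start end_ executed_addrs)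

-- ===== LEMMAS AND PROOFS =====

-- front-to-back grouping of consecutive integers into [lo,hi] runs
def runsFront : List Int → List (List Int)
  | [] => []
  | x :: xs =>
    match runsFront xs with
    | (a :: b :: []) :: t => if a = x + 1 then (x :: b :: []) :: t else [x, x] :: (a :: b :: []) :: t
    | rs => [x, x] :: rs

-- prepend the pending run [p,q], merging with the first run if adjacent
def glue (p q : Int) (rs : List (List Int)) : List (List Int) :=
  match rs with
  | (a :: b :: []) :: t => if a = q + 1 then (p :: b :: []) :: t else [p, q] :: (a :: b :: []) :: t
  | rs => [p, q] :: rs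

-- gap intervals left of each executed address, proof-side recursion mirroring B's fold
def gaps (cur : Int) (xs : List Int) (e : Int) : List (List Int) :=
  match xs with
  | [] => if cur ≤ e - 1 then [[cur, e - 1]] else []
  | x :: rest => if cur ≤ x - 1 then [cur, x - 1] :: gaps (x + 1) rest e else gaps (x + 1) rest e

theorem runsFront_cons (x : Int) (xs : List Int) : runsFront (x :: xs) = glue x x (runsFront xs) := by
  simp only [runsFront, glue]

theorem glue_glue (p q x : Int) (rs : List (List Int)) (h : x ≠ q + 1) :
    glue p q (glue x x rs) = [p, q] :: glue x x rs := by
  rcases rs with _ | ⟨r, t⟩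
  · simp [glue, h]
  · rcases r with _ | ⟨a, r⟩
    · simp [glue, h]
    · rcases r with _ | ⟨b, r⟩
      · simp [glue, h]
      · rcases r with _ | ⟨c, r⟩
        · simp only [glue]
          split_ifs <;> simp_all
        · simp [glue, h]

theorem glue_runsFront_cons (p q x : Int) (xs : List Int) (h : x = q + 1) :
    glue p q (runsFront (x :: xs)) = glue p x (runsFront xs) := by
  subst h
  rcases hr : runsFront xs with _ | ⟨r, t⟩
  · simp [runsFront_cons, hr, glue]
  · rcases r with _ | ⟨a, r⟩
    · simp [runsFront_cons, hr, glue]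
    · rcases r with _ | ⟨b, r⟩
      · simp [runsFront_cons, hr, glue]
      · rcases r with _ | ⟨c, r⟩
        · simp only [runsFront_cons, hr, glue]
          split_ifs <;> simp_all
        · simp [runsFront_cons, hr, glue]

theorem foldl_stepA (l : List Int) :
    ∀ (acc : List (List Int)) (p q : Int),
      List.foldl pyStepA (acc ++ [[p, q]]) l = acc ++ glue p q (runsFront l) := by
  induction l with
  | nil => intro acc p q; simp [runsFront, glue]
  | cons x xs ih =>
    intro acc p q
    have hlast : (acc ++ [[p, q]]).getLast? = some [p, q] := by
      simp
    by_cases hx : x = q + 1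
    · have hstep : pyStepA (acc ++ [[p, q]]) x = acc ++ [[p, x]] := by
        simp [pyStepA, hlast, hx]
      simp only [List.foldl_cons, hstep, ih acc p x, glue_runsFront_cons p q x xs hx]
    · have hstep : pyStepA (acc ++ [[p, q]]) x = (acc ++ [[p, q]]) ++ [[x, x]] := by
        simp [pyStepA, hlast, hx]
      rw [List.foldl_cons, hstep, ih (acc ++ [[p, q]]) x x,
        runsFront_cons, glue_glue p q x (runsFront xs) hx]
      simp

theorem foldl_stepA_nil (l : List Int) : List.foldl pyStepA [] l = runsFront l := by
  cases l with
  | nil => rfl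
  | cons x xs =>
    have h1 : pyStepA [] x = [] ++ [[x, x]] := by simp [pyStepA]
    rw [List.foldl_cons, h1, foldl_stepA xs [] x x, runsFront_cons]
    simp

theorem runsFront_head (y : Int) (ys : List Int) :
    ∃ b t, runsFront (y :: ys) = (y :: b :: []) :: t := by
  rcases hr : runsFront ys with _ | ⟨r, t⟩
  · exact ⟨y, [], by simp [runsFront_cons, hr, glue]⟩
  · rcases r with _ | ⟨a, r⟩
    · exact ⟨y, [] :: t, by simp [runsFront_cons, hr, glue]⟩
    · rcases r with _ | ⟨b, r⟩
      · exact ⟨y, [a] :: t, by simp [runsFront_cons, hr, glue]⟩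
      · rcases r with _ | ⟨c, r⟩
        · by_cases hab : a = y + 1
          · exact ⟨b, t, by simp [runsFront_cons, hr, glue, hab]⟩
          · exact ⟨y, [a, b] :: t, by simp [runsFront_cons, hr, glue, hab]⟩
        · exact ⟨y, (a :: b :: c :: r) :: t, by simp [runsFront_cons, hr, glue]⟩

-- runsFront of a full integer range followed by a block whose entries all exceed x
theorem runsFront_range_append (m : ℕ) :
    ∀ (cur x : Int), (x - cur).toNat = m →
    ∀ (ms : List Int), (∀ a ∈ ms, x < a) →
      runsFront (PySem.List.pyRange cur x 1 ++ ms) =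
        if cur < x then [cur, x - 1] :: runsFront ms else runsFront ms := by
  induction m with
  | zero =>
    intro cur x hm ms hms
    have hx : x ≤ cur := by omega
    simp [PySem.List.pyRange_one_eq_nil hx, if_neg (by omega : ¬ cur < x)]
  | succ n ih =>
    intro cur x hm ms hms
    have hcx : cur < x := by omega
    rw [PySem.List.pyRange_one_cons hcx]
    by_cases h2 : cur + 1 < x
    · have := ih (cur + 1) x (by omega) ms hms
      rw [List.cons_append, runsFront_cons, this, if_pos h2]
      simp [glue, if_pos rfl, if_pos hcx]
    · have hx1 : x = cur + 1 := by omega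
      have hnil : PySem.List.pyRange (cur + 1) x 1 = [] :=
        PySem.List.pyRange_one_eq_nil (by omega)
      simp only [hnil, List.cons_append, List.nil_append]
      rcases ms with _ | ⟨y, ys⟩
      · simp [runsFront, glue, hx1]
      · obtain ⟨b, t, hb⟩ := runsFront_head y ys
        have hy : x < y := hms y (by simp)
        rw [runsFront_cons, hb, if_pos hcx]
        simp only [glue]
        rw [if_neg (by omega : ¬ y = cur + 1)]
        have hc : x - 1 = cur := by omega
        rw [hc]

-- key lemma: B's gaps over a strictly increasing in-range list = A's grouped complement
theorem gaps_eq_runsFront (xs : List Int) :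
    ∀ (cur e : Int), xs.Pairwise (· < ·) → (∀ a ∈ xs, cur ≤ a ∧ a < e) →
      gaps cur xs e =
        runsFront ((PySem.List.pyRange cur e 1).filter (fun a => !(xs.contains a))) := by
  induction xs with
  | nil =>
    intro cur e _ _
    have hfilter : (PySem.List.pyRange cur e 1).filter (fun a => !(([] : List Int).contains a))
        = PySem.List.pyRange cur e 1 := by simp
    rw [hfilter]
    have := runsFront_range_append (e - cur).toNat cur e rfl [] (by simp)
    simp only [List.append_nil] at this
    rw [this]
    simp only [gaps, runsFront]
    by_cases h : cur < e
    · rw [if_pos h, if_pos (by omega : cur ≤ e - 1)]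
    · rw [if_neg h, if_neg (by omega : ¬ cur ≤ e - 1)]
  | cons x rest ih =>
    intro cur e hpw hin
    have hx := hin x (by simp)
    have hrest_gt : ∀ a ∈ rest, x < a := (List.pairwise_cons.mp hpw).1
    have hsplit : PySem.List.pyRange cur e 1 =
        PySem.List.pyRange cur x 1 ++ PySem.List.pyRange x e 1 :=
      PySem.List.pyRange_one_append cur x e (hx.1) (by omega)
    have hxe : PySem.List.pyRange x e 1 = x :: PySem.List.pyRange (x + 1) e 1 :=
      PySem.List.pyRange_one_cons (hx.2)
    rw [hsplit, hxe, List.filter_append]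
    have hleft : (PySem.List.pyRange cur x 1).filter (fun a => !((x :: rest).contains a))
        = PySem.List.pyRange cur x 1 := by
      apply List.filter_eq_self.mpr
      intro a ha
      have har := (PySem.List.mem_pyRange_one).mp ha
      have h1 : a ≠ x := by omega
      have h2 : a ∉ rest := fun hm => by have := hrest_gt a hm; omega
      simp [h1, h2]
    have hxdrop : List.filter (fun a => !((x :: rest).contains a)) (x :: PySem.List.pyRange (x + 1) e 1)
        = (PySem.List.pyRange (x + 1) e 1).filter (fun a => !(rest.contains a)) := by
      rw [List.filter_cons]
      rw [if_neg (by simp)]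
      apply List.filter_congr
      intro a ha
      have har := (PySem.List.mem_pyRange_one).mp ha
      have h1 : (a == x) = false := beq_eq_false_iff_ne.mpr (by omega)
      simp
      intro _
      omega
    rw [hleft, hxdrop]
    set ms := (PySem.List.pyRange (x + 1) e 1).filter (fun a => !(rest.contains a)) with hms
    have hms_gt : ∀ a ∈ ms, x < a := by
      intro a ha
      have := (PySem.List.mem_pyRange_one).mp (List.mem_of_mem_filter ha)
      omega
    rw [runsFront_range_append (x - cur).toNat cur x rfl ms hms_gt]
    have hih : gaps (x + 1) rest e = runsFront ms := by
      rw [hms]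
      exact ih (x + 1) e (List.pairwise_cons.mp hpw).2
        (fun a ha => ⟨by have := hrest_gt a ha; omega, (hin a (by simp [ha])).2⟩)
    simp only [gaps]
    by_cases h : cur < x
    · rw [if_pos h, if_pos (by omega : cur ≤ x - 1), hih]
    · rw [if_neg h, if_neg (by omega : ¬ cur ≤ x - 1), hih]

-- B's fold with its trailing append = out ++ gaps
theorem foldB_eq_gaps (xs : List Int) :
    ∀ (out : List (List Int)) (cur e : Int),
      (if (xs.foldl (fun (st : List (List Int) × Int) x =>
            (if st.2 ≤ x - 1 then st.1 ++ [[st.2, x - 1]] else st.1, x + 1)) (out, cur)).2 ≤ e - 1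
       then (xs.foldl (fun (st : List (List Int) × Int) x =>
            (if st.2 ≤ x - 1 then st.1 ++ [[st.2, x - 1]] else st.1, x + 1)) (out, cur)).1
          ++ [[(xs.foldl (fun (st : List (List Int) × Int) x =>
            (if st.2 ≤ x - 1 then st.1 ++ [[st.2, x - 1]] else st.1, x + 1)) (out, cur)).2, e - 1]]
       else (xs.foldl (fun (st : List (List Int) × Int) x =>
            (if st.2 ≤ x - 1 then st.1 ++ [[st.2, x - 1]] else st.1, x + 1)) (out, cur)).1)
      = out ++ gaps cur xs e := by
  induction xs with
  | nil =>
    intro out cur e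
    simp only [List.foldl_nil, gaps]
    split_ifs <;> simp
  | cons x rest ih =>
    intro out cur e
    simp only [List.foldl_cons, gaps]
    by_cases h : cur ≤ x - 1
    · rw [if_pos h]
      have := ih (out ++ [[cur, x - 1]]) (x + 1) e
      simp only at this ⊢
      rw [if_pos h, this]
      simp
    · rw [if_neg h]
      have := ih out (x + 1) e
      simp only at this ⊢
      rw [if_neg h, this]

-- ===== VERDICT (by name: the statement is the Claim_ definition above) =====
theorem get_unexecuted_ranges_spec : Claim_equal_get_unexecuted_ranges := by
  intro start end_ executed_addrs _
  unfold Spec_get_unexecuted_ranges get_unexecuted_ranges get_unexecuted_ranges_alt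
  simp only []
  set xs := PySem.List.sorted (PySem.Set.ofList (executed_addrs.filter (fun a => decide (start ≤ a ∧ a < end_)))) (fun x => x) false with hxs
  have hmem : ∀ a, a ∈ xs ↔ (a ∈ executed_addrs ∧ start ≤ a ∧ a < end_) := by
    intro a
    rw [hxs, PySem.List.mem_sorted, PySem.Set.mem_ofList, List.mem_filter]
    simp
  have hpw : xs.Pairwise (· < ·) := by
    rw [hxs]; exact PySem.List.sorted_ofList_pairwise_lt _
  have hin : ∀ a ∈ xs, start ≤ a ∧ a < end_ := fun a ha => ((hmem a).mp ha).2
  have hfc : (PySem.List.pyRange start end_ 1).filter (fun addr => !(executed_addrs.contains addr))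
      = (PySem.List.pyRange start end_ 1).filter (fun a => !(xs.contains a)) := by
    apply List.filter_congr
    intro a ha
    have har := (PySem.List.mem_pyRange_one).mp ha
    have hiff : (a ∈ executed_addrs) ↔ (a ∈ xs) := by rw [hmem a]; tauto
    simp [hiff]
  rw [foldl_stepA_nil, hfc, ← gaps_eq_runsFront xs start end_ hpw hin,
    foldB_eq_gaps xs [] start end_, List.nil_append]
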